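-- pv_equiv track=rewrite | github.com/Nellodipolito/streamlit-app | app/agent.py | format_evidence_with_id
-- ===== SOURCE A (Python) =====
-- from typing import List, Dict, Any, Tuple
--
-- def format_evidence_with_id(evidence: List[Dict]) -> str:
--     """Format evidence with unique IDs, grouping by link."""
--     grouped_by_link = {}
--     for item in evidence:
--         link = item.get('link', '')
--         if link not in grouped_by_link:
--             grouped_by_link[link] = []
--         grouped_by_link[link].append(item)
--
--     parts = []
--     for i, (link, chunks) in enumerate(grouped_by_link.items(), 1):
--         first_chunk = chunks[0]
--         title = first_chunk.get('title', '')
--         year = first_chunk.get('year', '')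
--
--         combined_content = []
--         for chunk in chunks:
--             header = chunk.get('header', '')
--             content = chunk.get('enriched_section_text', '')
--             if header:
--                 combined_content.append(f"Section: {header}\n{content}")
--             else:
--                 combined_content.append(content)
--         full_content = "\n\n---\n\n".join(combined_content)
--         parts.append(
--             f"EVIDENCE ID: {i}\n"
--             f"TITLE:     {title} ({year})\n"
--             f"CONTENT:   {full_content}"
--         )
--     return "\n\n".join(parts)
-- ===== SOURCE B (Python) =====
-- def format_evidence_with_id(evidence):
--     """Per-link rescan: enumerate distinct links by first appearance, and for
--     each rebuild its content by filtering the whole evidence list (no grouping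
--     dict of chunk lists is ever built)."""
--     seen = set()
--     blocks = []
--     i = 0
--     for first in evidence:
--         link = first.get('link', '')
--         if link in seen:
--             continue
--         seen.add(link)
--         i += 1
--         pieces = []
--         for item in evidence:
--             if item.get('link', '') == link:
--                 header = item.get('header', '')
--                 content = item.get('enriched_section_text', '')
--                 pieces.append(f"Section: {header}\n{content}" if header else content)
--         blocks.append(
--             f"EVIDENCE ID: {i}\n"
--             f"TITLE:     {first.get('title', '')} ({first.get('year', '')})\n"
--             f"CONTENT:   " + "\n\n---\n\n".join(pieces)
--         )
--     return "\n\n".join(blocks)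
-- ===== Notes on version B (the rewrite author's own statement) =====
-- stated objective: alternative
-- what changed: B never builds A's dict of chunk lists: it enumerates distinct links by first appearance with a seen-set and, for each link, rebuilds that link's content by a fresh filtering rescan of the whole evidence list (nested scans instead of hash grouping).
import Mathlib
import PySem

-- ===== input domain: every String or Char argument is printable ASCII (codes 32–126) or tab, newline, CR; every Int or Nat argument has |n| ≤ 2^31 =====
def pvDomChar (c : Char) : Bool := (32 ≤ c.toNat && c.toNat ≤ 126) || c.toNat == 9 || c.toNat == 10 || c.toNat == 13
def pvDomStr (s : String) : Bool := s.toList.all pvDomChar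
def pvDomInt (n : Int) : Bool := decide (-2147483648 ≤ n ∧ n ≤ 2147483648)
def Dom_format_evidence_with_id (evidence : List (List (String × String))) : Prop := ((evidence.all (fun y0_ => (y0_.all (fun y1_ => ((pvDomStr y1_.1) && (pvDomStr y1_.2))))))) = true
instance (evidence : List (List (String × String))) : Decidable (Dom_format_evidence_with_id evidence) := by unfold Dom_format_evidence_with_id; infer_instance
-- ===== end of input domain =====

-- B replaces A's dict-of-chunk-lists grouping by a per-link rescan of the whole evidence list (alternative algorithm); return values proved equal.

-- ===== PORT A =====
-- item.get(k, '') on a Python dict, ported via the association-list Dict (first match).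
def pyGetS (item : List (String × String)) (k : String) : String :=
  (PySem.Dict.mk item).getD k ""

def format_evidence_with_id (evidence : List (List (String × String))) : String :=
  -- grouped_by_link = {}; for item in evidence: … append
  let grouped : PySem.Dict String (List (List (String × String))) :=
    evidence.foldl (fun d item =>
      let link := pyGetS item "link"
      let d' := if d.contains link then d else d.insert link ([] : List (List (String × String)))
      d'.modify link [] (fun chunks => chunks ++ [item])) PySem.Dict.empty
  -- for i, (link, chunks) in enumerate(grouped_by_link.items(), 1): …
  let parts : Int × List String :=
    grouped.items.foldl (fun st p =>
      let chunks := p.2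
      let first_chunk := chunks.headD []   -- chunks[0]; every group is nonempty, so exact
      let title := pyGetS first_chunk "title"
      let year := pyGetS first_chunk "year"
      let combined := chunks.foldl (fun acc chunk =>
        let header := pyGetS chunk "header"
        let content := pyGetS chunk "enriched_section_text"
        if header ≠ "" then acc ++ ["Section: " ++ header ++ "\n" ++ content]
        else acc ++ [content]) ([] : List String)
      let full := PySem.Str.join "\n\n---\n\n" combined
      (st.1 + 1, st.2 ++ ["EVIDENCE ID: " ++ PySem.Int.toStr st.1 ++ "\nTITLE:     " ++ title ++ " (" ++ year ++ ")\nCONTENT:   " ++ full]))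
      ((1 : Int), ([] : List String))
  PySem.Str.join "\n\n" parts.2

-- ===== PORT B =====
-- the conditional expression  f"Section: {header}\n{content}" if header else content
def pieceOf (item : List (String × String)) : String :=
  let header := pyGetS item "header"
  let content := pyGetS item "enriched_section_text"
  if header ≠ "" then "Section: " ++ header ++ "\n" ++ content else content

def format_evidence_with_id_alt (evidence : List (List (String × String))) : String :=
  -- seen = set(); blocks = []; i = 0; for first in evidence: skip seen links, else rescan evidence
  let st : PySem.Set String × Int × List String :=
    evidence.foldl (fun st first =>
      let link := pyGetS first "link"
      if PySem.Set.contains st.1 link then st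
      else
        -- pieces: inner rescan of the WHOLE evidence list filtering on this link
        let pieces := evidence.foldl (fun acc item =>
          if pyGetS item "link" == link then acc ++ [pieceOf item] else acc) ([] : List String)
        (PySem.Set.add st.1 link, st.2.1 + 1,
         st.2.2 ++ ["EVIDENCE ID: " ++ PySem.Int.toStr (st.2.1 + 1) ++ "\nTITLE:     " ++ pyGetS first "title" ++ " (" ++ pyGetS first "year" ++ ")\nCONTENT:   " ++ PySem.Str.join "\n\n---\n\n" pieces]))
      (PySem.Set.empty, (0 : Int), ([] : List String))
  PySem.Str.join "\n\n" st.2.2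

-- ===== PRECONDITION & SPEC =====
def Spec_format_evidence_with_id (evidence : List (List (String × String))) (out : String) : Prop := out = format_evidence_with_id_alt evidence
instance (evidence : List (List (String × String))) (out : String) : Decidable (Spec_format_evidence_with_id evidence out) := by unfold Spec_format_evidence_with_id; infer_instance

-- ===== CLAIM (what is proved, stated in full; the proofs are below) =====
def Claim_equal_format_evidence_with_id : Prop := ∀ (evidence : List (List (String × String))), Dom_format_evidence_with_id evidence → Spec_format_evidence_with_id evidence (format_evidence_with_id evidence)

-- ===== LEMMAS AND PROOFS =====

-- abbreviations used only by the proofs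
def linkOf (it : List (String × String)) : String := pyGetS it "link"
def groupOf (ev : List (List (String × String))) (l : String) : List (List (String × String)) :=
  ev.filter (fun it => linkOf it == l)
def lnks (ev : List (List (String × String))) : List String := PySem.Set.ofList (ev.map linkOf)
def recP (p : String × List (List (String × String))) : String × String × List String :=
  (pyGetS (p.2.headD []) "title", pyGetS (p.2.headD []) "year", p.2.map pieceOf)
def recOf (ev : List (List (String × String))) (l : String) : String × String × List String :=
  recP (l, groupOf ev l)
def blockStr (i : Int) (r : String × String × List String) : String :=
  "EVIDENCE ID: " ++ PySem.Int.toStr i ++ "\nTITLE:     " ++ r.1 ++ " (" ++ r.2.1 ++ ")\nCONTENT:   " ++ PySem.Str.join "\n\n---\n\n" r.2.2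
def gFold (ev : List (List (String × String))) : PySem.Dict String (List (List (String × String))) :=
  ev.foldl (fun d item => d.modify (linkOf item) [] (fun chunks => chunks ++ [item])) PySem.Dict.empty

-- the common output shape: one block per link, ids counting up
def Arec (ev : List (List (String × String))) : Int → List String → List String
  | _, [] => []
  | i, l :: ls => blockStr i (recOf ev l) :: Arec ev (i + 1) ls

-- the links B's outer loop fires on, given the already-seen list
def newL : List String → List (List (String × String)) → List String
  | _, [] => []
  | seen, it :: rest =>
      if linkOf it ∈ seen then newL seen rest
      else linkOf it :: newL (seen ++ [linkOf it]) rest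

-- the guarded insert before the append is a no-op relative to modify-with-default-[]
lemma abody_eq (d : PySem.Dict String (List (List (String × String)))) (item : List (String × String)) :
    (if d.contains (linkOf item) then d else d.insert (linkOf item) []).modify (linkOf item) []
      (fun chunks => chunks ++ [item])
    = d.modify (linkOf item) [] (fun chunks => chunks ++ [item]) := by
  by_cases h : d.contains (linkOf item)
  · simp [h]
  · simp only [h, Bool.false_eq_true, if_false]
    simp only [PySem.Dict.modify]
    rw [PySem.Dict.getD_insert_self, PySem.Dict.getD_of_not_contains d _ (by simpa using h)]
    have h3 : ∀ p ∈ d.items, (p.1 == linkOf item) = false := by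
      intro p hp
      by_contra hbe
      apply h
      simp only [PySem.Dict.contains, List.any_eq_true]
      exact ⟨p, hp, by simpa using hbe⟩
    apply PySem.Dict.ext
    simp only [PySem.Dict.insert, h, Bool.false_eq_true, if_false]
    have h2 : ((PySem.Dict.mk (d.items ++ [(linkOf item, ([] : List (List (String × String))))])).contains
        (linkOf item)) = true := by
      simp [PySem.Dict.contains]
    rw [if_pos h2]
    simp only [List.map_append, List.map_cons, List.map_nil, BEq.rfl, if_true]
    have hmapid : List.map (fun p => if p.1 = linkOf item then (linkOf item, [item]) else p)
        d.items = d.items := by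
      conv_rhs => rw [← List.map_id d.items]
      refine List.map_congr_left (fun p hp => ?_)
      have hne : p.1 ≠ linkOf item := by simpa using h3 p hp
      simp [hne]
    simp [hmapid]

lemma grouped_eq_gFold (ev : List (List (String × String))) :
    ev.foldl (fun d item =>
      let link := pyGetS item "link"
      let d' := if d.contains link then d else d.insert link ([] : List (List (String × String)))
      d'.modify link [] (fun chunks => chunks ++ [item])) PySem.Dict.empty = gFold ev := by
  unfold gFold
  apply PySem.List.foldl_congr_mem
  intro d item _
  exact abody_eq d item

lemma gFold_getD (ev : List (List (String × String))) (l : String) :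
    (gFold ev).getD l [] = groupOf ev l := by
  unfold gFold groupOf
  rw [← List.foldl_map (f := fun it => (linkOf it, it))
        (g := fun (d : PySem.Dict String (List (List (String × String)))) p => d.modify p.1 [] (fun c => c ++ [p.2]))]
  rw [PySem.Dict.getD_foldl_modify_append]
  simp [List.filter_map, Function.comp_def]

lemma gFold_keys (ev : List (List (String × String))) : (gFold ev).keys = lnks ev := by
  unfold gFold lnks
  rw [PySem.Dict.keys_foldl_modify_key ev linkOf [] (fun _ x => fun v => v ++ [x])]
  simp [PySem.Set.update, PySem.Set.ofList_eq_foldl, PySem.Dict.keys_empty]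

lemma gFold_nodup (ev : List (List (String × String))) : (gFold ev).keys.Nodup := by
  rw [gFold_keys]
  exact PySem.Set.nodup_ofList _

lemma gFold_items (ev : List (List (String × String))) :
    (gFold ev).items = (lnks ev).map (fun l => (l, groupOf ev l)) := by
  have h1 : (gFold ev).items = (gFold ev).items.map (fun p => (p.1, (gFold ev).getD p.1 [])) := by
    conv_lhs => rw [← List.map_id ((gFold ev).items)]
    apply List.map_congr_left
    rintro ⟨k, v⟩ hp
    simp [PySem.Dict.getD_of_mem_items (gFold ev) hp (gFold_nodup ev)]
  calc (gFold ev).items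
      = (gFold ev).items.map (fun p => (p.1, (gFold ev).getD p.1 [])) := h1
    _ = (gFold ev).keys.map (fun k => (k, (gFold ev).getD k [])) := by
        simp [PySem.Dict.keys, List.map_map, Function.comp_def]
    _ = (lnks ev).map (fun l => (l, groupOf ev l)) := by
        rw [gFold_keys]
        exact List.map_congr_left fun l _ => by rw [gFold_getD]

lemma partsA_blocks (xs : List (String × List (List (String × String)))) (st : Int × List String) :
    xs.foldl (fun st p =>
      let chunks := p.2
      let first_chunk := chunks.headD []
      let title := pyGetS first_chunk "title"
      let year := pyGetS first_chunk "year"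
      let combined := chunks.foldl (fun acc chunk =>
        let header := pyGetS chunk "header"
        let content := pyGetS chunk "enriched_section_text"
        if header ≠ "" then acc ++ ["Section: " ++ header ++ "\n" ++ content]
        else acc ++ [content]) ([] : List String)
      let full := PySem.Str.join "\n\n---\n\n" combined
      (st.1 + 1, st.2 ++ ["EVIDENCE ID: " ++ PySem.Int.toStr st.1 ++ "\nTITLE:     " ++ title ++ " (" ++ year ++ ")\nCONTENT:   " ++ full])) st
    = xs.foldl (fun st p => (st.1 + 1, st.2 ++ [blockStr st.1 (recP p)])) st := by
  apply PySem.List.foldl_congr_mem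
  intro st p _
  have hcomb : p.2.foldl (fun acc chunk =>
        let header := pyGetS chunk "header"
        let content := pyGetS chunk "enriched_section_text"
        if header ≠ "" then acc ++ ["Section: " ++ header ++ "\n" ++ content]
        else acc ++ [content]) ([] : List String) = p.2.map pieceOf := by
    have h1 : ∀ (acc : List String) (chunk : List (String × String)), chunk ∈ p.2 →
        (let header := pyGetS chunk "header"
         let content := pyGetS chunk "enriched_section_text"
         if header ≠ "" then acc ++ ["Section: " ++ header ++ "\n" ++ content]
         else acc ++ [content]) = acc ++ [pieceOf chunk] := by
      intro acc chunk _
      simp only [pieceOf]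
      split_ifs <;> rfl
    exact (PySem.List.foldl_congr_mem _ _ _ _ h1).trans
      (by simpa using PySem.List.foldl_append_singleton_eq_map pieceOf p.2 [])
  simp only [hcomb]
  rfl

-- A's counter fold over the grouped items unrolls to Arec
lemma foldA_Arec (ev : List (List (String × String))) (ls : List String) (i : Int) (acc : List String) :
    ((ls.map (fun l => (l, groupOf ev l))).foldl
      (fun st p => (st.1 + 1, st.2 ++ [blockStr st.1 (recP p)])) (i, acc)).2
    = acc ++ Arec ev i ls := by
  induction ls generalizing i acc with
  | nil => simp [Arec]
  | cons l ls ih =>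
    simp only [List.map_cons, List.foldl_cons, Arec]
    rw [ih]
    simp [recOf]

-- B's inner rescan is the filtered piece list of the link's group
lemma inner_eq (ev : List (List (String × String))) (l : String) :
    ev.foldl (fun acc item => if pyGetS item "link" == l then acc ++ [pieceOf item] else acc)
      ([] : List String) = (groupOf ev l).map pieceOf := by
  have := PySem.List.foldl_append_if (fun item => pyGetS item "link" == l) pieceOf ev ([] : List String)
  simpa [groupOf, linkOf] using this

-- B's loop body, named so the induction rewrites stay syntactic
def Bstep (ev : List (List (String × String))) (st : PySem.Set String × Int × List String)
    (first : List (String × String)) : PySem.Set String × Int × List String :=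
  let link := pyGetS first "link"
  if PySem.Set.contains st.1 link then st
  else
    let pieces := ev.foldl (fun acc item =>
      if pyGetS item "link" == link then acc ++ [pieceOf item] else acc) ([] : List String)
    (PySem.Set.add st.1 link, st.2.1 + 1,
     st.2.2 ++ ["EVIDENCE ID: " ++ PySem.Int.toStr (st.2.1 + 1) ++ "\nTITLE:     " ++ pyGetS first "title" ++ " (" ++ pyGetS first "year" ++ ")\nCONTENT:   " ++ PySem.Str.join "\n\n---\n\n" pieces])

lemma Bstep_seen (ev : List (List (String × String))) (st : PySem.Set String × Int × List String)
    (first : List (String × String)) (h : PySem.Set.contains st.1 (pyGetS first "link") = true) :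
    Bstep ev st first = st := by
  simp only [Bstep, h, if_true]

lemma Bstep_new (ev : List (List (String × String))) (st : PySem.Set String × Int × List String)
    (first : List (String × String)) (h : PySem.Set.contains st.1 (pyGetS first "link") = false) :
    Bstep ev st first = (st.1 ++ [pyGetS first "link"], st.2.1 + 1,
      st.2.2 ++ ["EVIDENCE ID: " ++ PySem.Int.toStr (st.2.1 + 1) ++ "\nTITLE:     " ++ pyGetS first "title" ++ " (" ++ pyGetS first "year" ++ ")\nCONTENT:   " ++ PySem.Str.join "\n\n---\n\n" (ev.foldl (fun acc item => if pyGetS item "link" == pyGetS first "link" then acc ++ [pieceOf item] else acc) ([] : List String))]) := by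
  simp only [Bstep, h, Bool.false_eq_true, if_false, PySem.Set.add]

-- B's outer loop, started after a prefix whose links are exactly `seen`, emits Arec over the new links
lemma bloop (ev : List (List (String × String))) :
    ∀ (rest pre : List (List (String × String))) (seen : PySem.Set String) (i : Int) (acc : List String),
    ev = pre ++ rest → (∀ x, x ∈ seen ↔ x ∈ pre.map linkOf) →
    (rest.foldl (Bstep ev) (seen, i, acc)).2.2 = acc ++ Arec ev (i + 1) (newL seen rest) := by
  intro rest
  induction rest with
  | nil => intro pre seen i acc _ _; simp [newL, Arec]
  | cons it rest ih =>
    intro pre seen i acc hev hseen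
    have hev' : ev = (pre ++ [it]) ++ rest := by simp [hev]
    rw [List.foldl_cons]
    by_cases hmem : linkOf it ∈ seen
    · have hc : PySem.Set.contains seen (pyGetS it "link") = true := by
        rw [PySem.Set.contains_iff]; exact hmem
      rw [Bstep_seen ev (seen, i, acc) it hc, newL]
      simp only [hmem, if_true]
      apply ih (pre ++ [it]) seen i acc hev'
      intro x
      rw [hseen x]
      constructor
      · intro hx; simp [List.mem_append, hx]
      · intro hx
        rcases (by simpa using hx : x ∈ pre.map linkOf ∨ x = linkOf it) with h | h
        · exact h
        · rw [← hseen x]; exact h ▸ hmem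
    · have hc : PySem.Set.contains seen (pyGetS it "link") = false := by
        rw [← Bool.not_eq_true, PySem.Set.contains_iff]; exact hmem
      rw [Bstep_new ev (seen, i, acc) it hc, newL]
      simp only [hmem, if_false]
      rw [ih (pre ++ [it]) (seen ++ [pyGetS it "link"]) (i + 1) _ hev' ?_]
      · -- assemble the head block
        have hgrp : groupOf ev (linkOf it) = it :: groupOf rest (linkOf it) := by
          rw [hev, groupOf, List.filter_append]
          have hpre : pre.filter (fun a => linkOf a == linkOf it) = [] := by
            rw [List.filter_eq_nil_iff]
            intro a ha hba
            exact hmem ((hseen (linkOf it)).mpr (List.mem_map.mpr ⟨a, ha, by simpa using hba⟩))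
          rw [hpre]
          simp [groupOf]
        have hhead : blockStr (i + 1) (recOf ev (linkOf it))
            = "EVIDENCE ID: " ++ PySem.Int.toStr (i + 1) ++ "\nTITLE:     " ++ pyGetS it "title" ++ " (" ++ pyGetS it "year" ++ ")\nCONTENT:   " ++ PySem.Str.join "\n\n---\n\n" (ev.foldl (fun acc item => if pyGetS item "link" == pyGetS it "link" then acc ++ [pieceOf item] else acc) ([] : List String)) := by
          rw [show (pyGetS it "link") = linkOf it from rfl, inner_eq ev (linkOf it)]
          simp [blockStr, recOf, recP, hgrp]
        rw [Arec, ← hhead]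
        simp [linkOf]
      · intro x
        constructor
        · intro hx
          rcases List.mem_append.mp hx with h | h
          · simp [List.mem_append, (hseen x).mp h]
          · simp only [List.mem_singleton] at h
            simp [h, linkOf]
        · intro hx
          rcases (by simpa using hx : x ∈ pre.map linkOf ∨ x = linkOf it) with h | h
          · exact List.mem_append.mpr (Or.inl ((hseen x).mpr h))
          · simp [h, linkOf]

-- the links B fires on from an empty seen-set are exactly the distinct links in order
lemma newL_add (rest : List (List (String × String))) :
    ∀ (seen : List String),
    seen ++ newL seen rest = rest.foldl (fun s it => PySem.Set.add s (linkOf it)) seen := by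
  induction rest with
  | nil => intro seen; simp [newL]
  | cons it rest ih =>
    intro seen
    rw [newL, List.foldl_cons]
    by_cases hmem : linkOf it ∈ seen
    · have hadd : PySem.Set.add seen (linkOf it) = seen := by
        have hc : PySem.Set.contains seen (linkOf it) = true := by
          rw [PySem.Set.contains_iff]; exact hmem
        simp only [PySem.Set.add, hc, if_true]
      rw [hadd]
      simp only [hmem, if_true]
      exact ih seen
    · have hadd : PySem.Set.add seen (linkOf it) = seen ++ [linkOf it] := by
        have hc : PySem.Set.contains seen (linkOf it) = false := by
          rw [← Bool.not_eq_true, PySem.Set.contains_iff]; exact hmem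
        simp only [PySem.Set.add, hc, Bool.false_eq_true, if_false]
      rw [hadd]
      simp only [hmem, if_false]
      rw [← ih (seen ++ [linkOf it])]
      simp

lemma newL_lnks (ev : List (List (String × String))) : newL PySem.Set.empty ev = lnks ev := by
  have h := newL_add ev []
  simp only [List.nil_append] at h
  show newL [] ev = lnks ev
  rw [h, lnks, PySem.Set.ofList_eq_foldl, ← List.foldl_map]

-- ===== VERDICT (by name: the statement is the Claim_ definition above) =====
theorem format_evidence_with_id_spec : Claim_equal_format_evidence_with_id := by
  intro ev _
  show format_evidence_with_id ev = format_evidence_with_id_alt ev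
  have hA : format_evidence_with_id ev =
      PySem.Str.join "\n\n" (((ev.foldl (fun d item =>
        let link := pyGetS item "link"
        let d' := if d.contains link then d else d.insert link ([] : List (List (String × String)))
        d'.modify link [] (fun chunks => chunks ++ [item])) PySem.Dict.empty).items.foldl (fun st p =>
          let chunks := p.2
          let first_chunk := chunks.headD []
          let title := pyGetS first_chunk "title"
          let year := pyGetS first_chunk "year"
          let combined := chunks.foldl (fun acc chunk =>
            let header := pyGetS chunk "header"
            let content := pyGetS chunk "enriched_section_text"
            if header ≠ "" then acc ++ ["Section: " ++ header ++ "\n" ++ content]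
            else acc ++ [content]) ([] : List String)
          let full := PySem.Str.join "\n\n---\n\n" combined
          (st.1 + 1, st.2 ++ ["EVIDENCE ID: " ++ PySem.Int.toStr st.1 ++ "\nTITLE:     " ++ title ++ " (" ++ year ++ ")\nCONTENT:   " ++ full]))
          ((1 : Int), ([] : List String))).2) := rfl
  rw [hA, grouped_eq_gFold, partsA_blocks, gFold_items, foldA_Arec]
  have hB : format_evidence_with_id_alt ev =
      PySem.Str.join "\n\n" ((ev.foldl (Bstep ev)
        (PySem.Set.empty, (0 : Int), ([] : List String))).2.2) := rfl
  rw [hB, bloop ev ev [] PySem.Set.empty 0 [] (by simp) (by simp [PySem.Set.empty])]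
  rw [newL_lnks]
  norm_num
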